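-- pv_equiv track=rewrite | github.com/Rekklessss/geogpt-rag | rag_server/text_split_md.py | concat_sentences
-- ===== SOURCE A (Python) =====
-- def sentence_counter(text, counter):
--     for c in text:
--         for label in counter:
--             if c == label:
--                 counter[label] += 1
--     return counter
--
-- def concat_sentences(sentences):
--     n_sentences = []
--     temp = []
--     counter = {"(": 0, "[": 0, ")": 0, "]": 0}
--     for sent in sentences:
--         counter = sentence_counter(sent, counter)
--         temp.append(sent)
--         if (counter["("] > counter[")"] or counter["["] > counter["]"]) and len(temp) < 10:
--             continue
--         else:
--             n_sentences.append(temp)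
--             temp = []
--             counter = {"(": 0, "[": 0, ")": 0, "]": 0}
--     return [" ".join(s) for s in n_sentences]
-- ===== SOURCE B (Python) =====
-- def _take_group(window, p, b, k):
--     """Length of the next group, scanning a window of at most 10 sentence deltas.
--
--     Returns the number of sentences the group takes, or None if the window is
--     exhausted while still unbalanced (the trailing sentences are dropped)."""
--     if not window:
--         return None
--     dp, db = window[0]
--     p, b, k = p + dp, b + db, k + 1
--     if (p <= 0 and b <= 0) or k == 10:
--         return k
--     return _take_group(window[1:], p, b, k)
--
-- def concat_sentences(sentences):
--     deltas = [
--         (sum(c == "(" for c in s) - sum(c == ")" for c in s),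
--          sum(c == "[" for c in s) - sum(c == "]" for c in s))
--         for s in sentences
--     ]
--     out = []
--     start = 0
--     while start < len(sentences):
--         k = _take_group(deltas[start:start + 10], 0, 0, 0)
--         if k is None:
--             break
--         out.append(" ".join(sentences[start:start + k]))
--         start += k
--     return out
-- ===== Notes on version B (the rewrite author's own statement) =====
-- stated objective: alternative
-- what changed: Replaces A's single streaming fold (temp list plus a four-key count dict mutated per character and flushed in place) with a staged design: one comprehension precomputes each sentence's net bracket deltas, then a loop repeatedly locates the next group's cut point via a bounded 10-wide window search over the deltas and slices the group out of the sentence list.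
import Mathlib
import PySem

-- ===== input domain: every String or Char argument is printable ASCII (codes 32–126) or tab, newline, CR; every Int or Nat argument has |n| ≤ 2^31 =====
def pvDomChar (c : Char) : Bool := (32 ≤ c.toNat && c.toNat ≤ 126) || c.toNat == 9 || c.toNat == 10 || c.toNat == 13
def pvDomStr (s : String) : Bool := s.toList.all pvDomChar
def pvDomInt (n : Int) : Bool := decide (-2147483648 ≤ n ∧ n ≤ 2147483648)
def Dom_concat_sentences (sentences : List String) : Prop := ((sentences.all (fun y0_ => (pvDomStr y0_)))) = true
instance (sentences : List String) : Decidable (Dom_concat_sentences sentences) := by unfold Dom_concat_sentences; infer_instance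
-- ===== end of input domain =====

-- B replaces A's streaming fold (temp list + four-key count dict flushed in place) by a staged
-- design: precompute each sentence's net bracket deltas, then repeatedly find the next group's
-- cut point by a bounded window search and slice the group out; same values, different structure.

-- ===== PORT A =====
def sentence_counter (text : String) (counter : PySem.Dict String Int) : PySem.Dict String Int :=
  text.toList.foldl (fun ctr ch =>
    ctr.keys.foldl (fun d label => if String.ofList [ch] = label then d.modify label 0 (· + 1) else d) ctr) counter

def stepA (st : List (List String) × List String × PySem.Dict String Int) (sent : String) :
    List (List String) × List String × PySem.Dict String Int :=
  let counter := sentence_counter sent st.2.2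
  let temp := st.2.1 ++ [sent]
  if (counter.getD "(" 0 > counter.getD ")" 0 ∨ counter.getD "[" 0 > counter.getD "]" 0)
      ∧ temp.length < 10 then
    (st.1, temp, counter)
  else
    (st.1 ++ [temp], ([] : List String), PySem.Dict.ofList [("(", 0), ("[", 0), (")", 0), ("]", 0)])

def concat_sentences (sentences : List String) : List String :=
  ((sentences.foldl stepA ([], [], PySem.Dict.ofList [("(", 0), ("[", 0), (")", 0), ("]", 0)])).1).map
    (fun s => PySem.Str.join " " s)

-- ===== PORT B =====
-- _take_group(window, p, b, k): recursion on the window (window[0] / window[1:])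
def take_group : List (Int × Int) → Int → Int → Int → Option Int
  | [], _, _, _ => none
  | d :: rest, p, b, k =>
    let p' := p + d.1
    let b' := b + d.2
    let k' := k + 1
    if (p' ≤ 0 ∧ b' ≤ 0) ∨ k' = 10 then some k' else take_group rest p' b' k'

-- termination helper for the while loop below (cited by name in decreasing_by)
lemma take_group_bounds : ∀ (w : List (Int × Int)) (p b k j : Int),
    take_group w p b k = some j → k + 1 ≤ j ∧ j ≤ k + w.length := by
  intro w
  induction w with
  | nil => intro p b k j h; simp [take_group] at h
  | cons d rest ih =>
    intro p b k j h
    simp only [take_group] at h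
    split at h
    · obtain rfl := Option.some.inj h
      refine ⟨le_refl _, ?_⟩
      simp only [List.length_cons]
      push_cast
      omega
    · have := ih _ _ _ _ h
      simp only [List.length_cons] at *
      push_cast at *
      omega

-- the while loop of concat_sentences (start index, out accumulator)
def altGo (sentences : List String) (deltas : List (Int × Int)) (start : Int) (out : List String) :
    List String :=
  if h : start < (sentences.length : Int) then
    match htk : take_group (PySem.List.slice deltas (some start) (some (start + 10))) 0 0 0 with
    | none => out
    | some k =>
      altGo sentences deltas (start + k)
        (out ++ [PySem.Str.join " " (PySem.List.slice sentences (some start) (some (start + k)))])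
  else out
termination_by ((sentences.length : Int) - start).toNat
decreasing_by
  have hk := (take_group_bounds _ 0 0 0 k htk).1
  omega

-- deltas: sum(c == "(" for c in s) - sum(c == ")" for c in s), likewise for "[" / "]"
def sent_delta (s : String) : Int × Int :=
  ((s.toList.count '(' : Int) - (s.toList.count ')' : Int),
   (s.toList.count '[' : Int) - (s.toList.count ']' : Int))

def concat_sentences_alt (sentences : List String) : List String :=
  altGo sentences (sentences.map sent_delta) 0 []

-- ===== PRECONDITION & SPEC =====
def Spec_concat_sentences (sentences : List String) (out : List String) : Prop := out = concat_sentences_alt sentences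
instance (sentences : List String) (out : List String) : Decidable (Spec_concat_sentences sentences out) := by unfold Spec_concat_sentences; infer_instance

-- ===== CLAIM (what is proved, stated in full; the proofs are below) =====
def Claim_equal_concat_sentences : Prop := ∀ (sentences : List String), Dom_concat_sentences sentences → Spec_concat_sentences sentences (concat_sentences sentences)

-- ===== LEMMAS AND PROOFS =====

-- The shape A's counter dict always has: exactly the four bracket keys, in insertion order.
def cdict (a b c d : Int) : PySem.Dict String Int :=
  ((((PySem.Dict.empty).insert "(" a).insert "[" b).insert ")" c).insert "]" d

lemma single_inj {ch l : Char} (h : String.ofList [ch] = String.ofList [l]) : ch = l := by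
  have := congrArg String.toList h
  simpa [String.toList_ofList] using this

lemma count_cons_int (ch x : Char) (cs : List Char) :
    (((ch :: cs).count x : Int)) = (cs.count x : Int) + (if ch = x then 1 else 0) := by
  by_cases h : ch = x <;> simp [h]

lemma cdict_congr {a b c d a' b' c' d' : Int} (ha : a = a') (hb : b = b') (hc : c = c')
    (hd : d = d') : cdict a b c d = cdict a' b' c' d' := by
  subst ha; subst hb; subst hc; subst hd; rfl

-- One character of A's inner key loop on the canonical dict.
lemma innerA_cdict (a b c d : Int) (ch : Char) :
    (cdict a b c d).keys.foldl
      (fun d' label => if String.ofList [ch] = label then d'.modify label 0 (· + 1) else d') (cdict a b c d)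
    = cdict (a + if ch = '(' then 1 else 0) (b + if ch = '[' then 1 else 0)
            (c + if ch = ')' then 1 else 0) (d + if ch = ']' then 1 else 0) := by
  by_cases h1 : ch = '('
  · subst h1
    rw [if_pos rfl, if_neg (show ('(':Char) ≠ '[' by decide),
        if_neg (show ('(':Char) ≠ ')' by decide), if_neg (show ('(':Char) ≠ ']' by decide)]
    simp only [add_zero]; rfl
  by_cases h2 : ch = '['
  · subst h2
    rw [if_neg (show ('[':Char) ≠ '(' by decide), if_pos rfl,
        if_neg (show ('[':Char) ≠ ')' by decide), if_neg (show ('[':Char) ≠ ']' by decide)]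
    simp only [add_zero]; rfl
  by_cases h3 : ch = ')'
  · subst h3
    rw [if_neg (show (')':Char) ≠ '(' by decide), if_neg (show (')':Char) ≠ '[' by decide),
        if_pos rfl, if_neg (show (')':Char) ≠ ']' by decide)]
    simp only [add_zero]; rfl
  by_cases h4 : ch = ']'
  · subst h4
    rw [if_neg (show (']':Char) ≠ '(' by decide), if_neg (show (']':Char) ≠ '[' by decide),
        if_neg (show (']':Char) ≠ ')' by decide), if_pos rfl]
    simp only [add_zero]; rfl
  · rw [if_neg h1, if_neg h2, if_neg h3, if_neg h4]
    simp only [add_zero]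
    show List.foldl _ (cdict a b c d) ["(", "[", ")", "]"] = _
    rw [show ("(" : String) = String.ofList ['('] from rfl,
        show ("[" : String) = String.ofList ['['] from rfl,
        show (")" : String) = String.ofList [')'] from rfl,
        show ("]" : String) = String.ofList [']'] from rfl]
    simp only [List.foldl]
    rw [if_neg (show ¬(String.ofList [ch] = String.ofList ['(']) from fun h => h1 (single_inj h)),
        if_neg (show ¬(String.ofList [ch] = String.ofList ['[']) from fun h => h2 (single_inj h)),
        if_neg (show ¬(String.ofList [ch] = String.ofList [')']) from fun h => h3 (single_inj h)),
        if_neg (show ¬(String.ofList [ch] = String.ofList [']']) from fun h => h4 (single_inj h))]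

-- A's per-sentence counting, in closed form over the canonical dict.
lemma sentence_counter_cdict (s : String) (a b c d : Int) :
    sentence_counter s (cdict a b c d)
    = cdict (a + s.toList.count '(') (b + s.toList.count '[')
            (c + s.toList.count ')') (d + s.toList.count ']') := by
  unfold sentence_counter
  induction s.toList generalizing a b c d with
  | nil => simp
  | cons ch cs ih =>
    simp only [List.foldl_cons]
    rw [innerA_cdict, ih]
    exact cdict_congr (by rw [count_cons_int]; ring) (by rw [count_cons_int]; ring)
      (by rw [count_cons_int]; ring) (by rw [count_cons_int]; ring)

lemma getD_cdict_p (a b c d : Int) : (cdict a b c d).getD "(" 0 = a := rfl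
lemma getD_cdict_b (a b c d : Int) : (cdict a b c d).getD "[" 0 = b := rfl
lemma getD_cdict_P (a b c d : Int) : (cdict a b c d).getD ")" 0 = c := rfl
lemma getD_cdict_B (a b c d : Int) : (cdict a b c d).getD "]" 0 = d := rfl

lemma init_cdict : PySem.Dict.ofList [("(", (0:Int)), ("[", 0), (")", 0), ("]", 0)] = cdict 0 0 0 0 := rfl

-- Proof-side streaming view of the grouping (A's control flow with the counter dict collapsed
-- to the two net balances); both ports are proved equal to it.
def gB : List String → Int → Int → List String → List String
  | [], _, _, _ => []
  | s :: rest, p, b, temp =>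
    let p' := p + (sent_delta s).1
    let b' := b + (sent_delta s).2
    let temp' := temp ++ [s]
    if (p' ≤ 0 ∧ b' ≤ 0) ∨ 10 ≤ temp'.length then
      PySem.Str.join " " temp' :: gB rest 0 0 []
    else gB rest p' b' temp'

-- A's fold tracks gB: paren balance = #'(' − #')', bracket balance = #'[' − #']'.
lemma loop_corr (ss : List String) (acc : List (List String)) (temp : List String) (a b c d : Int) :
    ((ss.foldl stepA (acc, temp, cdict a b c d)).1).map (fun s => PySem.Str.join " " s)
    = acc.map (fun s => PySem.Str.join " " s) ++ gB ss (a - c) (b - d) temp := by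
  induction ss generalizing acc temp a b c d with
  | nil => simp [gB]
  | cons s ss ih =>
    simp only [List.foldl_cons]
    rw [show stepA (acc, temp, cdict a b c d) s
        = if (a + s.toList.count '(' > c + s.toList.count ')' ∨
              b + s.toList.count '[' > d + s.toList.count ']') ∧ (temp ++ [s]).length < 10 then
            (acc, temp ++ [s], cdict (a + s.toList.count '(') (b + s.toList.count '[')
              (c + s.toList.count ')') (d + s.toList.count ']'))
          else (acc ++ [temp ++ [s]], [], cdict 0 0 0 0) from by
      simp only [stepA, sentence_counter_cdict, getD_cdict_p, getD_cdict_b, getD_cdict_P,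
        getD_cdict_B, init_cdict]]
    simp only [gB, sent_delta]
    by_cases hc : (a + s.toList.count '(' > c + s.toList.count ')' ∨
        b + s.toList.count '[' > d + s.toList.count ']') ∧ (temp ++ [s]).length < 10
    · rw [if_pos hc, if_neg (by omega)]
      have h1 : a - c + ((s.toList.count '(' : Int) - s.toList.count ')')
          = (a + s.toList.count '(') - (c + s.toList.count ')') := by ring
      have h2 : b - d + ((s.toList.count '[' : Int) - s.toList.count ']')
          = (b + s.toList.count '[') - (d + s.toList.count ']') := by ring
      rw [h1, h2]
      exact ih acc (temp ++ [s]) _ _ _ _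
    · rw [if_neg hc, if_pos (by omega)]
      have := ih (acc ++ [temp ++ [s]]) [] 0 0 0 0
      simpa using this

-- The 10-wide window is as good as the whole delta list (flush fires at k' = 10 anyway).
lemma take_group_window : ∀ (d : List (Int × Int)) (p b k : Int), 0 ≤ k → k ≤ 9 →
    take_group (d.take (10 - k).toNat) p b k = take_group d p b k := by
  intro d
  induction d with
  | nil => intro p b k _ _; simp
  | cons x rest ih =>
    intro p b k hk0 hk9
    obtain ⟨m, hm⟩ : ∃ m, (10 - k).toNat = m + 1 := ⟨(10 - k).toNat - 1, by omega⟩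
    rw [hm, List.take_succ_cons]
    simp only [take_group]
    split
    · rfl
    · rename_i hcond
      have hne : k + 1 ≠ 10 := fun h => hcond (Or.inr h)
      have hm' : m = (10 - (k + 1)).toNat := by omega
      rw [hm']
      exact ih _ _ _ (by omega) (by omega)

-- gB, characterised by where take_group cuts.
lemma gB_take_group (ss : List String) : ∀ (p b : Int) (temp : List String), temp.length ≤ 9 →
    gB ss p b temp =
      match take_group (ss.map sent_delta) p b (temp.length : Int) with
      | none => []
      | some j =>
        PySem.Str.join " " (temp ++ ss.take (j.toNat - temp.length))
          :: gB (ss.drop (j.toNat - temp.length)) 0 0 [] := by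
  induction ss with
  | nil => intro p b temp _; simp [gB, take_group]
  | cons s rest ih =>
    intro p b temp htemp
    simp only [List.map_cons, gB, take_group]
    by_cases hc : (p + (sent_delta s).1 ≤ 0 ∧ b + (sent_delta s).2 ≤ 0) ∨ (temp.length : Int) + 1 = 10
    · have hcg : (p + (sent_delta s).1 ≤ 0 ∧ b + (sent_delta s).2 ≤ 0) ∨ 10 ≤ (temp ++ [s]).length := by
        simp only [List.length_append, List.length_cons, List.length_nil]
        omega
      rw [if_pos hcg, if_pos hc]
      simp
    · have hcg : ¬ ((p + (sent_delta s).1 ≤ 0 ∧ b + (sent_delta s).2 ≤ 0) ∨ 10 ≤ (temp ++ [s]).length) := by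
        simp only [List.length_append, List.length_cons, List.length_nil]
        omega
      rw [if_neg hcg, if_neg hc]
      have hrec := ih (p + (sent_delta s).1) (b + (sent_delta s).2) (temp ++ [s])
        (by simp only [List.length_append, List.length_cons, List.length_nil]; omega)
      rw [hrec]
      have hlen : ((temp ++ [s]).length : Int) = (temp.length : Int) + 1 := by simp
      rw [hlen]
      cases htk : take_group (rest.map sent_delta) (p + (sent_delta s).1) (b + (sent_delta s).2)
          ((temp.length : Int) + 1) with
      | none => rfl
      | some j =>
        have hb := take_group_bounds _ _ _ _ _ htk
        have h2 : j.toNat - temp.length = (j.toNat - (temp ++ [s]).length) + 1 := by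
          simp only [List.length_append, List.length_cons, List.length_nil, List.length_map] at *
          omega
        simp [h2, List.take_succ_cons, List.drop_succ_cons, List.append_assoc]

-- unfolding lemmas for the while loop
lemma altGo_stop (ss : List String) (ds : List (Int × Int)) (start : Int) (out : List String)
    (h : start < (ss.length : Int))
    (htk : take_group (PySem.List.slice ds (some start) (some (start + 10))) 0 0 0 = none) :
    altGo ss ds start out = out := by
  rw [altGo, dif_pos h]
  split
  · rfl
  · rename_i k heq
    rw [htk] at heq
    cases heq

lemma altGo_step (ss : List String) (ds : List (Int × Int)) (start : Int) (out : List String)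
    (k : Int) (h : start < (ss.length : Int))
    (htk : take_group (PySem.List.slice ds (some start) (some (start + 10))) 0 0 0 = some k) :
    altGo ss ds start out
      = altGo ss ds (start + k)
          (out ++ [PySem.Str.join " " (PySem.List.slice ss (some start) (some (start + k)))]) := by
  rw [altGo, dif_pos h]
  split
  · rename_i heq
    rw [htk] at heq
    cases heq
  · rename_i k' heq
    rw [htk] at heq
    obtain rfl := Option.some.inj heq
    rfl

-- The while loop of B, against gB on the remaining suffix.
lemma altGo_spec (ss : List String) : ∀ (n : Nat) (start : Int) (out : List String), 0 ≤ start →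
    ss.length - start.toNat = n →
    altGo ss (ss.map sent_delta) start out = out ++ gB (ss.drop start.toNat) 0 0 [] := by
  intro n
  induction n using Nat.strong_induction_on with
  | _ n ihn =>
    intro start out h0 hn
    by_cases h : start < (ss.length : Int)
    · have hst : start = ((start.toNat : Nat) : Int) := by omega
      have hslice : PySem.List.slice (ss.map sent_delta) (some start) (some (start + 10))
          = ((ss.drop start.toNat).map sent_delta).take 10 := by
        conv_lhs => rw [hst]
        rw [show ((start.toNat : Nat) : Int) + 10 = ((start.toNat : Nat) : Int) + ((10 : Nat) : Int) from by norm_num]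
        rw [PySem.List.slice_natCast_add, ← List.map_drop]
      have hwin := take_group_window ((ss.drop start.toNat).map sent_delta) 0 0 0 (by omega) (by omega)
      rw [show ((10 : Int) - 0).toNat = 10 from rfl] at hwin
      cases htk0 : take_group ((ss.drop start.toNat).map sent_delta) 0 0 0 with
      | none =>
        have htkS : take_group (PySem.List.slice (ss.map sent_delta) (some start) (some (start + 10))) 0 0 0 = none := by
          rw [hslice, hwin]; exact htk0
        rw [altGo_stop ss _ start out h htkS]
        have hgB : gB (ss.drop start.toNat) 0 0 [] = [] := by
          have hq := gB_take_group (ss.drop start.toNat) 0 0 [] (by simp)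
          simp only [List.length_nil, Nat.cast_zero, Nat.sub_zero, List.nil_append] at hq
          rw [htk0] at hq
          exact hq
        rw [hgB]
        simp
      | some j =>
        have hb := take_group_bounds _ _ _ _ _ htk0
        have htkS : take_group (PySem.List.slice (ss.map sent_delta) (some start) (some (start + 10))) 0 0 0 = some j := by
          rw [hslice, hwin]; exact htk0
        rw [altGo_step ss _ start out j h htkS]
        have hslice2 : PySem.List.slice ss (some start) (some (start + j))
            = (ss.drop start.toNat).take j.toNat := by
          conv_lhs => rw [hst]
          rw [show ((start.toNat : Nat) : Int) + j = ((start.toNat : Nat) : Int) + ((j.toNat : Nat) : Int) from by omega]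
          rw [PySem.List.slice_natCast_add]
        rw [hslice2]
        have hrec := ihn (ss.length - (start + j).toNat) (by omega) (start + j)
          (out ++ [PySem.Str.join " " ((ss.drop start.toNat).take j.toNat)]) (by omega) rfl
        rw [hrec]
        have hgB : gB (ss.drop start.toNat) 0 0 []
            = PySem.Str.join " " ((ss.drop start.toNat).take j.toNat)
                :: gB ((ss.drop start.toNat).drop j.toNat) 0 0 [] := by
          have hq := gB_take_group (ss.drop start.toNat) 0 0 [] (by simp)
          simp only [List.length_nil, Nat.cast_zero, Nat.sub_zero, List.nil_append] at hq
          rw [htk0] at hq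
          exact hq
        rw [hgB]
        have hdd : (ss.drop start.toNat).drop j.toNat = ss.drop (start + j).toNat := by
          rw [List.drop_drop]
          congr 1
          omega
        rw [hdd]
        simp [List.append_assoc]
    · rw [altGo, dif_neg h]
      have hd : ss.drop start.toNat = [] := List.drop_eq_nil_of_le (by omega)
      rw [hd]
      simp [gB]

-- ===== VERDICT (by name: the statement is the Claim_ definition above) =====
theorem concat_sentences_spec : Claim_equal_concat_sentences := by
  intro ss _
  unfold Spec_concat_sentences concat_sentences concat_sentences_alt
  rw [init_cdict]
  have hA := loop_corr ss [] [] 0 0 0 0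
  have hB := altGo_spec ss (ss.length - 0) 0 [] (by omega) (by simp)
  simp only [List.map_nil, List.nil_append, sub_zero] at hA hB
  rw [hA, hB]
  simp
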